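-- pv_equiv track=rewrite | github.com/mohaddese-zamani/practice | practice1.py | practice1
-- ===== SOURCE A (Python) =====
-- def practice1(jomleh):
--     yekta = []
--     tartib_tekrar = {}
--
--     for i in jomleh:
--         shomaresh = jomleh.count(i)
--         if shomaresh == 1:
--             yekta.append(i)
--         tartib_tekrar[i] = shomaresh
--     return yekta, tartib_tekrar
-- ===== SOURCE B (Python) =====
-- def practice1(jomleh):
--     tartib_tekrar = {}
--     for ch in jomleh:
--         tartib_tekrar[ch] = tartib_tekrar.get(ch, 0) + 1
--     yekta = [ch for ch, n in tartib_tekrar.items() if n == 1]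
--     return yekta, tartib_tekrar
-- ===== Notes on version B (the rewrite author's own statement) =====
-- stated objective: faster
-- what changed: B builds the frequency dict in a single pass by incrementing counts and then collects yekta by scanning the dict's items (keys with count 1, in insertion = first-appearance order), instead of A's per-character jomleh.count rescan.
import Mathlib
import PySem

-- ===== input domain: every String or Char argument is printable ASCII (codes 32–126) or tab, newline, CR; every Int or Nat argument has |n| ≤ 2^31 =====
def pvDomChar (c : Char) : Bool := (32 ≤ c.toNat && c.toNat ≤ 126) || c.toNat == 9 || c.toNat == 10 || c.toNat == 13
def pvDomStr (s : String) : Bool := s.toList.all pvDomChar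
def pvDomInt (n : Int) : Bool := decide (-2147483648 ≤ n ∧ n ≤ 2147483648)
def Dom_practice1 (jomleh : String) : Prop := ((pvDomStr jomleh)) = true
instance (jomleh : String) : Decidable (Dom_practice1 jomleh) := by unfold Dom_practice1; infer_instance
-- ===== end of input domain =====

-- B replaces A's per-character jomleh.count rescan (O(n^2)) by a one-pass count dict
-- followed by a scan over the dict's items; proved to return the same pair on every input.


-- ===== PORT A =====
-- 'for i in jomleh' yields one-character strings; 'jomleh.count(i)' for a
-- single-character substring is exactly the number of occurrences of that
-- character, ported as a count over jomleh.toList (exact).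
def practice1 (jomleh : String) : List String × (List (String × Int)) :=
  let r := jomleh.toList.foldl
    (fun (st : List String × PySem.Dict String Int) c =>
      let i : String := String.ofList [c]
      let shomaresh : Int := (jomleh.toList.count c : Int)
      ((if shomaresh = 1 then st.1 ++ [i] else st.1), st.2.insert i shomaresh))
    ([], PySem.Dict.empty)
  (r.1, r.2.items)

-- ===== PORT B =====
def practice1_alt (jomleh : String) : List String × (List (String × Int)) :=
  let d := jomleh.toList.foldl
    (fun (d : PySem.Dict String Int) c =>
      let ch : String := String.ofList [c]
      d.insert ch (d.getD ch 0 + 1))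
    PySem.Dict.empty
  ((d.items.filter (fun p => p.2 == 1)).map (·.1), d.items)

-- ===== PRECONDITION & SPEC =====
def Spec_practice1 (jomleh : String) (out : List String × (List (String × Int))) : Prop := out = practice1_alt jomleh
instance (jomleh : String) (out : List String × (List (String × Int))) : Decidable (Spec_practice1 jomleh out) := by unfold Spec_practice1; infer_instance

-- ===== CLAIM (what is proved, stated in full; the proofs are below) =====
def Claim_equal_practice1 : Prop := ∀ (jomleh : String), Dom_practice1 jomleh → Spec_practice1 jomleh (practice1 jomleh)

-- ===== LEMMAS AND PROOFS =====

theorem pvMk_injective : Function.Injective (fun c => String.ofList [c]) := by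
  intro a b h
  have := congrArg String.toList h
  simp at this
  exact this

theorem pvCount_keys (l : List Char) (c : Char) :
    (l.map (fun c => String.ofList [c])).count (String.ofList [c]) = l.count c :=
  List.count_map_of_injective l _ pvMk_injective c

-- A's dict loop: repeated overwrite with the key's full count ⇒ items = first occurrences paired with counts
theorem pvInsertAll (cnt : String → Int) (L : List String) :
    (L.foldl (fun d s => d.insert s (cnt s)) PySem.Dict.empty).items
      = (PySem.Set.ofList L).map (fun k => (k, cnt k)) := by
  induction L using List.reverseRecOn with
  | nil => rfl
  | append_singleton M x ih =>
    rw [List.foldl_append, List.foldl_cons, List.foldl_nil,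
        PySem.Set.ofList_append_singleton]
    set d := M.foldl (fun d s => d.insert s (cnt s)) PySem.Dict.empty with hd
    have hkeys : d.keys = (PySem.Set.ofList M) := by
      simp [PySem.Dict.keys, ih, List.map_map, Function.comp_def]
    by_cases hx : x ∈ PySem.Set.ofList M
    · have hc : d.contains x = true := by
        rw [PySem.Dict.contains_iff_mem_keys, hkeys]; exact hx
      rw [PySem.Dict.items_insert, hc, if_pos rfl, ih,
          PySem.Set.add_of_mem hx, List.map_map]
      apply List.map_congr_left
      intro k hk
      by_cases h : k = x <;> simp [Function.comp, h]
    · have hc : d.contains x = false := by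
        rw [← Bool.not_eq_true, PySem.Dict.contains_iff_mem_keys, hkeys]; exact hx
      rw [PySem.Dict.items_insert, hc, if_neg (by simp), ih,
          PySem.Set.add_of_not_mem hx, List.map_append, List.map_cons, List.map_nil]

-- a filter that only keeps elements occurring once is unchanged by first-occurrence dedup
theorem pvFilter_once (L : List String) (P : String → Bool)
    (h : ∀ s, P s = true → L.count s ≤ 1) :
    L.filter P = (PySem.Set.ofList L).filter P := by
  induction L using List.reverseRecOn with
  | nil => rfl
  | append_singleton M x ih =>
    have hM : ∀ s, P s = true → M.count s ≤ 1 := by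
      intro s hs
      have := h s hs
      have hle : M.count s ≤ (M ++ [x]).count s := by
        simp [List.count_append]
      omega
    rw [List.filter_append, PySem.Set.ofList_append_singleton, ih hM]
    by_cases hx : x ∈ PySem.Set.ofList M
    · have hxM : x ∈ M := (PySem.Set.mem_ofList _ _).1 hx
      have hPx : P x = false := by
        by_contra hp
        have hp' : P x = true := by revert hp; cases P x <;> simp
        have := h x hp'
        have h1 : 1 ≤ M.count x := List.one_le_count_iff.2 hxM
        have : (M ++ [x]).count x = M.count x + 1 := by simp
        omega
      rw [PySem.Set.add_of_mem hx]
      simp [hPx]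
    · rw [PySem.Set.add_of_not_mem hx, List.filter_append]

theorem pvA_eq (jomleh : String) : practice1 jomleh = practice1_alt jomleh := by
  unfold practice1 practice1_alt
  simp only []
  set l := jomleh.toList with hl
  set key : Char → String := fun c => String.ofList [c] with hkey
  set L := l.map key with hL
  -- split A's paired fold into two independent folds
  rw [PySem.List.foldl_prod_mk
      (f := fun (ys : List String) (c : Char) =>
        if (l.count c : Int) = 1 then ys ++ [key c] else ys)
      (g := fun (d : PySem.Dict String Int) (c : Char) =>
        d.insert (key c) ((l.count c : Int)))]
  -- B's fold is Counter over the key list L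
  have hBfold : l.foldl
      (fun (d : PySem.Dict String Int) c =>
        d.insert (key c) (d.getD (key c) 0 + 1)) PySem.Dict.empty
      = PySem.Dict.counter L := by
    rw [hL, ← PySem.Dict.foldl_insert_getD_add_one_eq_counter,
        List.foldl_map (f := key)
          (g := fun (d : PySem.Dict String Int) s => d.insert s (d.getD s 0 + 1))]
  -- A's dict fold, rewritten over L with a key-only value function
  have hAfold : l.foldl
      (fun (d : PySem.Dict String Int) c =>
        d.insert (key c) ((l.count c : Int))) PySem.Dict.empty
      = L.foldl (fun d s => d.insert s ((L.count s : Int))) PySem.Dict.empty := by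
    rw [hL, List.foldl_map (f := key)
          (g := fun (d : PySem.Dict String Int) s => d.insert s ((L.count s : Int)))]
    apply PySem.List.foldl_congr_mem
    intro d c _
    rw [hL, pvCount_keys]
  have hitems : (l.foldl
      (fun (d : PySem.Dict String Int) c =>
        d.insert (key c) ((l.count c : Int))) PySem.Dict.empty).items
      = (PySem.Set.ofList L).map (fun k => (k, (L.count k : Int))) := by
    rw [hAfold, pvInsertAll]
  have hBitems : (l.foldl
      (fun (d : PySem.Dict String Int) c =>
        d.insert (key c) (d.getD (key c) 0 + 1)) PySem.Dict.empty).items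
      = (PySem.Set.ofList L).map (fun k => (k, (L.count k : Int))) := by
    rw [hBfold, PySem.Dict.items_counter]
  -- first components
  have hys : l.foldl
      (fun (ys : List String) c =>
        if (l.count c : Int) = 1 then ys ++ [key c] else ys) []
      = L.filter (fun s => (L.count s : Int) == 1) := by
    have hstep : l.foldl
        (fun (ys : List String) c =>
          if (l.count c : Int) = 1 then ys ++ [key c] else ys) []
        = l.foldl
        (fun (ys : List String) c =>
          if ((l.count c : Int) == 1) = true then ys ++ [key c] else ys) [] := by
      apply PySem.List.foldl_congr_mem
      intro ys c _
      by_cases h : (l.count c : Int) = 1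
      · rw [if_pos h, if_pos (by simp [h])]
      · rw [if_neg h, if_neg (by simpa using h)]
    rw [hstep, PySem.List.foldl_append_if (fun c => ((l.count c : Int) == 1)) key,
        List.nil_append, hL, List.filter_map]
    congr 1
    apply List.filter_congr
    intro c _
    simp only [Function.comp_apply]
    rw [pvCount_keys]
  have hyB : (((PySem.Set.ofList L).map (fun k => (k, (L.count k : Int)))).filter
        (fun p => p.2 == 1)).map (fun p => p.1)
      = L.filter (fun s => (L.count s : Int) == 1) := by
    rw [List.filter_map, List.map_map]
    have h1 : (PySem.Set.ofList L).filter
        ((fun (p : String × Int) => p.2 == 1) ∘ (fun k => (k, (L.count k : Int))))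
        = (PySem.Set.ofList L).filter (fun s => (L.count s : Int) == 1) := by
      apply List.filter_congr; intro k _; rfl
    rw [h1, ← pvFilter_once L (fun s => (L.count s : Int) == 1) ?_]
    · simp [Function.comp_def]
    · intro s hs
      have : (L.count s : Int) = 1 := by simpa using hs
      omega
  rw [hys, hitems, hBitems, hyB]

-- ===== VERDICT (by name: the statement is the Claim_ definition above) =====
theorem practice1_spec : Claim_equal_practice1 := by
  intro jomleh _
  unfold Spec_practice1
  exact pvA_eq jomleh
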